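-- pv_equiv track=rewrite | github.com/utkusevl/BBM103 | text_analyzer.py | find_longest_words
-- ===== SOURCE A (Python) =====
-- def calculate_word_frequencies(words):
--     freq = {}
--     for word in words:
--         if word in freq:
--             freq[word] += 1
--         else:
--             freq[word] = 1
--     return freq
--
-- def find_longest_words(words):
--     word_count = calculate_word_frequencies(words)
--     longest_length = max(len(word) for word in words)
--
--     longest_words = {}
--     for word in words:
--         if len(word) == longest_length:
--             longest_words[word] = word_count[word]
--
--     longest_words = dict(sorted(longest_words.items(), key=lambda x: (-x[1], x[0])))
--
--     return list(longest_words.keys()), longest_words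
-- ===== SOURCE B (Python) =====
-- def find_longest_words(words):
--     best = -1
--     counts = {}
--     for word in words:
--         n = len(word)
--         if n > best:
--             best = n
--             counts = {word: 1}
--         elif n == best:
--             counts[word] = counts.get(word, 0) + 1
--     items = sorted(counts.items(), key=lambda x: (-x[1], x[0]))
--     return [w for w, _ in items], dict(items)
-- ===== Notes on version B (the rewrite author's own statement) =====
-- stated objective: alternative
-- what changed: B replaces A's two dict passes (a frequency table over the whole corpus, then a separate max and a filtered lookup pass) by one pass that tracks the current best length and a count table restricted to words of that length, resetting it when a longer word appears.
import Mathlib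
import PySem

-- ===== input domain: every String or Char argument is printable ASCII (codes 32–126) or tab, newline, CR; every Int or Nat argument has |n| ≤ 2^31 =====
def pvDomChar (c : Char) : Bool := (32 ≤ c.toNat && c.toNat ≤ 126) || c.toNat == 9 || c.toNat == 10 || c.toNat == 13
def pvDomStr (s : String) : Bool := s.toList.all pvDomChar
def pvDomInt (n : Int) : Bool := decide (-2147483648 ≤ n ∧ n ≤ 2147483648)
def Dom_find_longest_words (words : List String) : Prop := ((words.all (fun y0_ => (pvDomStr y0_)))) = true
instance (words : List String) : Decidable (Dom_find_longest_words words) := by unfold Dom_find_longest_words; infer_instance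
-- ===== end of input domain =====

-- B replaces A's whole-corpus frequency table + separate max + filtered lookup pass by ONE pass
-- keeping only (best length so far, counts of words of that length); objective: alternative.

-- ===== PORT A =====
def calculate_word_frequencies (words : List String) : PySem.Dict String Int :=
  words.foldl (fun freq word =>
    if freq.contains word then freq.insert word (freq.getD word 0 + 1)
    else freq.insert word 1) PySem.Dict.empty

def find_longest_words (words : List String) : List String × (List (String × Int)) :=
  let word_count := calculate_word_frequencies words
  match PySem.List.max? (words.map (fun w => PySem.Str.len w)) (fun x => x) with
  | none => ([], [])  -- unreachable under Pre_: Python's max() raises ValueError on an empty list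
  | some longest_length =>
    -- word_count[word]: the key is always present (word ∈ words), so getD is exact here
    let longest_words := words.foldl (fun d word =>
      if PySem.Str.len word = longest_length then d.insert word (word_count.getD word 0) else d)
      PySem.Dict.empty
    let sortedItems := PySem.List.sorted2 longest_words.items (fun x => -x.2) (fun x => x.1)
    (sortedItems.map (·.1), sortedItems)

-- ===== PORT B =====
def find_longest_words_alt (words : List String) : List String × (List (String × Int)) :=
  let st := words.foldl (fun (s : Int × PySem.Dict String Int) word =>
      let n := PySem.Str.len word
      if n > s.1 then (n, PySem.Dict.empty.insert word 1)
      else if n = s.1 then (s.1, s.2.insert word (s.2.getD word 0 + 1))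
      else s) (-1, PySem.Dict.empty)
  let items := PySem.List.sorted2 st.2.items (fun x => -x.2) (fun x => x.1)
  (items.map (·.1), items)

-- ===== PRECONDITION & SPEC =====
-- Pre_ excludes exactly the empty list, on which Python's max() (and hence A) raises ValueError.
def Pre_find_longest_words (words : List String) : Prop := words ≠ []
instance (words : List String) : Decidable (Pre_find_longest_words words) := by unfold Pre_find_longest_words; infer_instance
def pvWitness_find_longest_words : List String := ["ab", "b", "cd", "ab"]

def Spec_find_longest_words (words : List String) (out : List String × (List (String × Int))) : Prop := out = find_longest_words_alt words
instance (words : List String) (out : List String × (List (String × Int))) : Decidable (Spec_find_longest_words words out) := by unfold Spec_find_longest_words; infer_instance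

-- ===== CLAIM (what is proved, stated in full; the proofs are below) =====
def Claim_equal_find_longest_words : Prop := ∀ (words : List String), Dom_find_longest_words words → Pre_find_longest_words words → Spec_find_longest_words words (find_longest_words words)

-- ===== LEMMAS AND PROOFS =====
lemma pvA1 (words : List String) :
    words.foldl (fun freq word =>
      if freq.contains word then freq.insert word (freq.getD word 0 + 1)
      else freq.insert word 1) PySem.Dict.empty = PySem.Dict.counter words := by
  rw [← PySem.Dict.foldl_insert_getD_add_one_eq_counter]
  congr 1
  funext d w
  by_cases h : d.contains w
  · rw [if_pos h]
  · have h' : d.contains w = false := by simpa using h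
    rw [if_neg h, PySem.Dict.getD_of_not_contains d 0 h']
    norm_num

lemma pvA2 (l : List String) (d0 : PySem.Dict String Int) (f : String → Int) (L : Int) :
    l.foldl (fun d w => if PySem.Str.len w = L then d.insert w (f w) else d) d0
      = (l.filter (fun w => decide (PySem.Str.len w = L))).foldl (fun d w => d.insert w (f w)) d0 := by
  induction l generalizing d0 with
  | nil => rfl
  | cons x t ih =>
      rw [List.foldl_cons, List.filter_cons]
      by_cases h : PySem.Str.len x = L
      · rw [if_pos h, if_pos (by simp only [decide_eq_true_eq]; exact h), List.foldl_cons, ih]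
      · rw [if_neg h, if_neg (by simp only [decide_eq_true_eq]; exact h), ih]

lemma pvA3 (l : List String) (f : String → Int) :
    (l.foldl (fun d x => d.insert x (f x)) PySem.Dict.empty).items
      = (PySem.Set.ofList l).map (fun k => (k, f k)) := by
  induction l using List.reverseRecOn with
  | nil => rfl
  | append_singleton t x ih =>
      have hkeys : (t.foldl (fun d x => d.insert x (f x)) PySem.Dict.empty).keys
          = PySem.Set.ofList t := by
        rw [PySem.Dict.keys_foldl_insert t (fun _ x => f x) PySem.Dict.empty]
        exact PySem.Set.update_nil_left t
      rw [List.foldl_append, List.foldl_cons, List.foldl_nil,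
        PySem.Set.ofList_append_singleton, PySem.Set.add_eq_ite]
      by_cases h : x ∈ PySem.Set.ofList t
      · have hc : (t.foldl (fun d x => d.insert x (f x)) PySem.Dict.empty).contains x := by
          rw [PySem.Dict.contains_iff_mem_keys, hkeys]; exact h
        rw [PySem.Dict.items_insert_of_contains _ _ hc, ih, if_pos h, List.map_map]
        apply List.map_congr_left
        intro k hk
        by_cases hkx : k = x
        · simp [hkx]
        · simp [hkx]
      · have hc : (t.foldl (fun d x => d.insert x (f x)) PySem.Dict.empty).contains x = false := by
          rw [Bool.eq_false_iff, ne_eq, PySem.Dict.contains_iff_mem_keys, hkeys]; exact h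
        rw [PySem.Dict.items_insert_of_not_contains _ _ hc, ih, if_neg h]
        simp

def pvBest (l : List String) : Int := l.foldl (fun b w => max b (PySem.Str.len w)) (-1)

lemma pvCounterSnoc (xs : List String) (x : String) :
    PySem.Dict.counter (xs ++ [x])
      = (PySem.Dict.counter xs).insert x ((PySem.Dict.counter xs).getD x 0 + 1) := by
  rw [← PySem.Dict.foldl_insert_getD_add_one_eq_counter,
      ← PySem.Dict.foldl_insert_getD_add_one_eq_counter, List.foldl_append,
      List.foldl_cons, List.foldl_nil]

lemma pvB1 (l : List String) :
    l.foldl (fun (s : Int × PySem.Dict String Int) word =>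
        let n := PySem.Str.len word
        if n > s.1 then (n, PySem.Dict.empty.insert word 1)
        else if n = s.1 then (s.1, s.2.insert word (s.2.getD word 0 + 1))
        else s) (-1, PySem.Dict.empty)
      = (pvBest l, PySem.Dict.counter (l.filter (fun w => decide (PySem.Str.len w = pvBest l)))) := by
  induction l using List.reverseRecOn with
  | nil => rfl
  | append_singleton t x ih =>
      have hbest : pvBest (t ++ [x]) = max (pvBest t) (PySem.Str.len x) := by
        unfold pvBest; rw [List.foldl_append]; rfl
      have hub : ∀ w ∈ t, PySem.Str.len w ≤ pvBest t :=
        (PySem.List.le_foldl_max_int t PySem.Str.len (-1)).2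
      rw [List.foldl_append, ih, List.foldl_cons, List.foldl_nil, List.filter_append,
        List.filter_cons, List.filter_nil]
      rcases lt_trichotomy (pvBest t) (PySem.Str.len x) with hlt | heq | hgt
      · have hb' : pvBest (t ++ [x]) = PySem.Str.len x := by rw [hbest]; exact max_eq_right hlt.le
        have hfe : t.filter (fun w => decide (PySem.Str.len w = PySem.Str.len x)) = [] := by
          rw [List.filter_eq_nil_iff]
          intro w hw
          simp only [decide_eq_true_eq]
          exact fun hl => absurd (hl ▸ hub w hw) (not_le.mpr hlt)
        simp only [hb', hfe]
        have h1 : PySem.Dict.counter [x] = PySem.Dict.empty.insert x 1 := by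
          have := pvCounterSnoc [] x
          simpa using this
        rw [if_pos hlt, List.nil_append]
        simp [h1]
      · have hb' : pvBest (t ++ [x]) = pvBest t := by rw [hbest]; exact max_eq_left heq.ge
        simp only [hb', heq]
        simp only [decide_true, if_true]
        rw [if_neg (lt_irrefl _), pvCounterSnoc]
      · have hb' : pvBest (t ++ [x]) = pvBest t := by rw [hbest]; exact max_eq_left hgt.le
        simp only [hb']
        rw [if_neg (not_lt.mpr hgt.le), if_neg (ne_of_lt hgt),
          if_neg (by simp only [decide_eq_true_eq]; exact ne_of_lt hgt), List.append_nil]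

lemma pvLMax (x : String) (t : List String) :
    PySem.List.max? ((x :: t).map (fun w => PySem.Str.len w)) (fun y => y)
      = some (pvBest (x :: t)) := by
  rw [List.map_cons, PySem.List.max?_id_cons, List.foldl_map]
  unfold pvBest
  rw [List.foldl_cons]
  congr 1


-- A's longest_words dict has the same items list as counter over the filtered corpus
lemma pvAitems (x : String) (t : List String) :
    ((x :: t).foldl (fun d word =>
      if PySem.Str.len word = pvBest (x :: t) then
        d.insert word ((PySem.Dict.counter (x :: t)).getD word 0) else d)
      PySem.Dict.empty).items
    = (PySem.Dict.counter ((x :: t).filter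
        (fun w => decide (PySem.Str.len w = pvBest (x :: t))))).items := by
  set words := x :: t
  set L := pvBest words
  set F := words.filter (fun w => decide (PySem.Str.len w = L)) with hF
  rw [pvA2, ← hF, pvA3, PySem.Dict.items_counter]
  apply List.map_congr_left
  intro k hk
  have hkF : k ∈ F := (PySem.Set.mem_ofList _ _).mp hk
  have hpred : (fun w => decide (PySem.Str.len w = L)) k = true := (List.mem_filter.mp hkF).2
  rw [PySem.Dict.getD_counter]
  rw [List.count_filter (p := fun w => decide (PySem.Str.len w = L)) (a := k) (l := words) hpred]

-- ===== VERDICT (by name: the statement is the Claim_ definition above) =====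
theorem find_longest_words_spec : Claim_equal_find_longest_words := by
  intro words _ hpre
  unfold Spec_find_longest_words
  have h : words ≠ [] := hpre
  obtain ⟨x, t, rfl⟩ := List.exists_cons_of_ne_nil h
  unfold find_longest_words find_longest_words_alt calculate_word_frequencies
  rw [pvA1, pvLMax, pvB1]
  simp only [pvAitems]
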